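-- pv_equiv track=rewrite | github.com/jamesburton/tsunami | tsunami/bash_security.py | _has_unescaped
-- ===== SOURCE A (Python) =====
-- def _has_unescaped(text: str, char: str) -> bool:
--     """Check if text contains an unescaped instance of char."""
--     i = 0
--     while i < len(text):
--         if text[i] == '\\' and i + 1 < len(text):
--             i += 2
--             continue
--         if text[i] == char:
--             return True
--         i += 1
--     return False
-- ===== SOURCE B (Python) =====
-- def _has_unescaped(text: str, char: str) -> bool:
--     """Check if text contains an unescaped instance of char.
--
--     Characterisation instead of a scan: an occurrence of char is unescaped
--     iff it is preceded by an even-length run of backslashes; a backslash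
--     itself is unescaped only as the lone tail of an odd trailing run.
--     """
--     if char == '\\':
--         return _bs_run(text) % 2 == 1
--     return any(c == char and _bs_run(text[:i]) % 2 == 0
--                for i, c in enumerate(text))
--
-- def _bs_run(prefix: str) -> int:
--     """Length of the trailing run of backslashes of prefix."""
--     n = 0
--     for ch in reversed(prefix):
--         if ch != '\\':
--             break
--         n += 1
--     return n
-- ===== Notes on version B (the rewrite author's own statement) =====
-- stated objective: alternative
-- what changed: Replaced A's skip-two index scan by a characterisation-based check: for char != '\' it tests whether some occurrence of char is preceded by an even-length backslash run (via enumerate + a trailing-run helper on the prefix), and for char == '\' it just tests whether the trailing backslash run has odd length.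
import Mathlib
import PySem

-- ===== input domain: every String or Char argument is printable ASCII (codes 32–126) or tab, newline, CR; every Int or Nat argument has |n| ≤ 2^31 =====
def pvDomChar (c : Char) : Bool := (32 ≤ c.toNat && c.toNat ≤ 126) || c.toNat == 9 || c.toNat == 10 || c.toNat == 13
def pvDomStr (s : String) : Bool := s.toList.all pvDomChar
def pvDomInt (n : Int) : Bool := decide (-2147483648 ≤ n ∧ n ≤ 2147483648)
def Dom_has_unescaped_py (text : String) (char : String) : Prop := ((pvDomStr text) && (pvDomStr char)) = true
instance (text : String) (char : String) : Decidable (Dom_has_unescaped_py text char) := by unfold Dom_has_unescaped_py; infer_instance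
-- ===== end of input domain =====

-- B replaces A's skip-two index scan by a characterisation: an occurrence of char is unescaped
-- iff preceded by an even-length backslash run (for char = '\\': iff the trailing run is odd); objective: alternative.


-- ===== PORT A =====
-- while-loop over index i; at a backslash with a following char skip two, else compare text[i] to char.
def hasUnescapedGoA (char : String) : List Char → Bool
  | [] => false
  | c :: rest =>
    if c = '\\' ∧ rest ≠ [] then hasUnescapedGoA char rest.tail
    else if String.ofList [c] = char then true
    else hasUnescapedGoA char rest
  termination_by l => l.length
  decreasing_by
    all_goals simp [List.length_tail]

def has_unescaped_py (text : String) (char : String) : Bool :=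
  hasUnescapedGoA char text.toList

-- ===== PORT B =====
-- _bs_run: the for-loop over reversed(prefix) with break, as structural recursion on the reversed list.
def pvBsRun : List Char → Nat
  | [] => 0
  | ch :: r => if ch ≠ '\\' then 0 else pvBsRun r + 1

def has_unescaped_py_alt (text : String) (char : String) : Bool :=
  if char = "\\" then pvBsRun text.toList.reverse % 2 == 1
  else (PySem.List.enumerate text.toList).any (fun ic =>
    String.ofList [ic.2] == char && pvBsRun ((text.toList.take ic.1.toNat).reverse) % 2 == 0)

-- ===== PRECONDITION & SPEC =====
def Spec_has_unescaped_py (text : String) (char : String) (out : Bool) : Prop := out = has_unescaped_py_alt text char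
instance (text : String) (char : String) (out : Bool) : Decidable (Spec_has_unescaped_py text char out) := by unfold Spec_has_unescaped_py; infer_instance

-- ===== CLAIM (what is proved, stated in full; the proofs are below) =====
def Claim_equal_has_unescaped_py : Prop := ∀ (text : String) (char : String), Dom_has_unescaped_py text char → Spec_has_unescaped_py text char (has_unescaped_py text char)

-- ===== LEMMAS AND PROOFS =====

-- reference model used only in proofs: left-to-right pass carrying the current backslash-run length
def pvRef (char : String) : List Char → Nat → Bool
  | [], _ => false
  | c :: rest, run =>
      (String.ofList [c] == char && run % 2 == 0) || pvRef char rest (if c = '\\' then run + 1 else 0)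

theorem pvBsRun_append (r : List Char) (c : Char) :
    pvBsRun (r ++ [c]) = if c = '\\' ∧ pvBsRun r = r.length then r.length + 1 else pvBsRun r := by
  induction r with
  | nil => by_cases h : c = '\\' <;> simp [pvBsRun, h]
  | cons x r ih =>
    by_cases hx : x = '\\'
    · subst hx
      by_cases hc : c = '\\' <;>
        by_cases hr : pvBsRun r = r.length <;>
          simp_all [pvBsRun]
    · simp [pvBsRun, hx]

theorem trail_cons_ne (c : Char) (l : List Char) (h : c ≠ '\\') :
    pvBsRun ((c :: l).reverse) = pvBsRun l.reverse := by
  simp [List.reverse_cons, pvBsRun_append, h]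

theorem pvBsRun_le (r : List Char) : pvBsRun r ≤ r.length := by
  induction r with
  | nil => simp [pvBsRun]
  | cons x r ih =>
    by_cases hx : x = '\\'
    · simp [pvBsRun, hx]; omega
    · simp [pvBsRun, hx]

theorem trail_cons2_parity (d : Char) (l : List Char) :
    pvBsRun (('\\' :: d :: l).reverse) % 2 = pvBsRun l.reverse % 2 := by
  have h1 : ('\\' :: d :: l).reverse = (l.reverse ++ [d]) ++ ['\\'] := by simp
  have hle := pvBsRun_le l.reverse
  have hlen : (l.reverse ++ [d]).length = l.reverse.length + 1 := by simp
  rw [h1, pvBsRun_append (l.reverse ++ [d]) '\\', pvBsRun_append l.reverse d]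
  simp only [hlen, List.length_reverse] at hle ⊢
  split_ifs <;> first | omega | simp_all

theorem goA_eq_ref (char : String) (hch : char ≠ "\\") : ∀ (l : List Char) (r : Nat),
    r % 2 = 0 → hasUnescapedGoA char l = pvRef char l r := by
  intro l
  fun_induction hasUnescapedGoA char l with
  | case1 => intro r _; rfl
  | case2 c rest h ih =>
    intro r hr
    obtain ⟨hc, hne⟩ := h
    subst hc
    match rest, hne with
    | d :: rest', _ =>
      have hcchar : (String.ofList ['\\'] == char) = false :=
        beq_eq_false_iff_ne.mpr (fun hh => hch hh.symm)
      have hdodd : ((r + 1) % 2 == 0) = false := by simp; omega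
      show hasUnescapedGoA char rest' = pvRef char ('\\' :: d :: rest') r
      have hstep : pvRef char ('\\' :: d :: rest') r
          = pvRef char rest' (if d = '\\' then r + 1 + 1 else 0) := by
        simp [pvRef, hcchar, hdodd]
      rw [hstep]
      by_cases hd : d = '\\'
      · rw [if_pos hd]; simpa using ih (r + 1 + 1) (by omega)
      · rw [if_neg hd]; simpa using ih 0 (by omega)
  | case3 c rest h heq =>
    intro r hr
    simp [pvRef, heq, hr]
  | case4 c rest h heq ih =>
    intro r hr
    simp only [pvRef, beq_eq_false_iff_ne.mpr heq, Bool.false_and, Bool.false_or]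
    by_cases hc : c = '\\'
    · have hrest : rest = [] := by by_contra hne; exact h ⟨hc, hne⟩
      subst hrest
      simp [hasUnescapedGoA, pvRef]
    · rw [if_neg hc, ih 0 (by omega)]

theorem anyEnum (char : String) : ∀ (l pre full : List Char), full = pre ++ l →
    ((PySem.List.enumerate l (pre.length : Int)).any (fun ic =>
        String.ofList [ic.2] == char && pvBsRun ((full.take ic.1.toNat).reverse) % 2 == 0))
      = pvRef char l (pvBsRun pre.reverse) := by
  intro l
  induction l with
  | nil => intro pre full _; simp [PySem.List.enumerate_nil, pvRef]
  | cons c rest ih =>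
    intro pre full hfull
    rw [PySem.List.enumerate_cons, List.any_cons]
    have htake : full.take ((pre.length : Int)).toNat = pre := by
      subst hfull
      simp
    have htail : ((pre.length : Int) + 1) = (((pre ++ [c]).length : Nat) : Int) := by
      simp
    rw [htake, htail, ih (pre ++ [c]) full (by simp [hfull])]
    simp only [pvRef]
    congr 1
    have : pvBsRun ((pre ++ [c]).reverse) = if c = '\\' then pvBsRun pre.reverse + 1 else 0 := by
      by_cases hc : c = '\\' <;> simp [pvBsRun, hc]
    rw [this]

theorem goA_eq_trail : ∀ (l : List Char),
    hasUnescapedGoA "\\" l = (pvBsRun l.reverse % 2 == 1) := by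
  intro l
  fun_induction hasUnescapedGoA "\\" l with
  | case1 => rfl
  | case2 c rest h ih =>
    obtain ⟨hc, hne⟩ := h
    subst hc
    match rest, hne with
    | d :: rest', _ =>
      simp only [List.tail_cons] at ih ⊢
      rw [ih, trail_cons2_parity d rest']
  | case3 c rest h heq =>
    have hc : c = '\\' := by
      have h2 : ([c] : List Char) = ['\\'] := by
        have h3 := congrArg String.toList heq
        simpa using h3
      simpa using h2
    subst hc
    have hrest : rest = [] := by by_contra hne; exact h ⟨rfl, hne⟩
    subst hrest
    decide
  | case4 c rest h heq ih =>
    have hc : c ≠ '\\' := by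
      intro hcc; subst hcc; exact heq rfl
    rw [ih, trail_cons_ne c rest hc]

theorem has_unescaped_py_spec : Claim_equal_has_unescaped_py := by
  intro text char _
  unfold Spec_has_unescaped_py has_unescaped_py has_unescaped_py_alt
  by_cases hch : char = "\\"
  · subst hch
    rw [if_pos rfl]
    exact goA_eq_trail text.toList
  · rw [if_neg hch]
    have := anyEnum char text.toList [] text.toList (by simp)
    simp only [List.length_nil, Nat.cast_zero] at this
    rw [this]
    exact goA_eq_ref char hch text.toList 0 rfl
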